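-- pv_equiv track=rewrite | github.com/olp410412/wrapped_ollvm | LSIM_release1.py | find_previous
-- ===== SOURCE A (Python) =====
-- def find_previous(pre_list, this_list, x):
--     _result = 0
--     candidates = []
--     for j in range(0, len(this_list)):
--         if x == this_list[j]:
--             candidates.append(pre_list[j])
--     if 0 == len(candidates):
--         _result = -1
--     elif 1 == len(candidates):
--         _result = candidates[0]
--     else:
--         _result = min(candidates)
--     return _result
-- ===== SOURCE B (Python) =====
-- def find_previous(pre_list, this_list, x):
--     for p, t in sorted(zip(pre_list, this_list), key=lambda pt: pt[0]):
--         if t == x: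
--             return p
--     return -1
-- ===== Notes on version B (the rewrite author's own statement) =====
-- stated objective: alternative
-- what changed: Replaces collecting all matching pre_list values and taking min() with a sort of zip(pre_list, this_list) by pre value followed by an early-exit scan returning the first pair whose tag equals x; no candidates list and no min computation exist.
import Mathlib
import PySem

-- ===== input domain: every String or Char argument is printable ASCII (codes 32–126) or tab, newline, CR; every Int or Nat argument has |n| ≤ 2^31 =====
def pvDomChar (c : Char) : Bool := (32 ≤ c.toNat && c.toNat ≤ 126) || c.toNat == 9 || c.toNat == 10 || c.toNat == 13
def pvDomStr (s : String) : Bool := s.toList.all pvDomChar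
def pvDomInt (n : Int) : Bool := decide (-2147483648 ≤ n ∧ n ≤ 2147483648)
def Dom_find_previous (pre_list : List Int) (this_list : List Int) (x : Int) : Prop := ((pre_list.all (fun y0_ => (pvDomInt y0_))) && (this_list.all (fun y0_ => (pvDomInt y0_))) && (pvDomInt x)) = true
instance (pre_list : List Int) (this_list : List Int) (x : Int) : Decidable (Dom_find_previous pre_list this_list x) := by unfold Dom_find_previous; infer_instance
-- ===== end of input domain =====

-- B replaces A's collect-all-matching-candidates-then-min(0/1/many case analysis) with a
-- different algorithm: sort zip(pre_list, this_list) by pre value, then return the first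
-- pair whose tag equals x (objective: alternative; not faster).


-- ===== PORT A =====
-- Literal port of A: index loop over range(len(this_list)) building 'candidates',
-- then the 0/1/many case analysis.  pyGetD's default 0 is never reached inside
-- Pre_ (this_list[j] is always in range; pre_list[j] only on matches, which Pre_
-- keeps in range; candidates nonempty in the branches that index it).
def find_previous (pre_list : List Int) (this_list : List Int) (x : Int) : Int :=
  let candidates := (PySem.List.pyRange 0 (this_list.length : Int)).foldl
    (fun acc j => if x = PySem.List.pyGetD this_list j 0
                  then acc ++ [PySem.List.pyGetD pre_list j 0] else acc) []
  if candidates.length = 0 then -1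
  else if candidates.length = 1 then PySem.List.pyGetD candidates 0 0
  else (PySem.List.min? candidates id).getD 0

-- ===== PORT B =====
-- Literal port of B's for-loop with early return over the sorted pairs.
def pvScan (x : Int) : List (Int × Int) → Int
  | [] => -1
  | pt :: rest => if pt.2 = x then pt.1 else pvScan x rest

-- Literal port of B: sorted(zip(pre_list, this_list), key=lambda pt: pt[0]) (stable),
-- then return the first pair whose tag equals x, else -1.
def find_previous_alt (pre_list : List Int) (this_list : List Int) (x : Int) : Int :=
  pvScan x (PySem.List.sorted (pre_list.zip this_list) (fun pt => pt.1) false)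

-- ===== PRECONDITION & SPEC =====
-- Pre_ excludes exactly the inputs where Python A raises IndexError: a match
-- this_list[j] == x at an index j beyond the end of pre_list.
def Pre_find_previous (pre_list : List Int) (this_list : List Int) (x : Int) : Prop :=
  ∀ j ∈ List.range this_list.length, this_list.getD j 0 = x → j < pre_list.length
instance (pre_list : List Int) (this_list : List Int) (x : Int) : Decidable (Pre_find_previous pre_list this_list x) := by unfold Pre_find_previous; infer_instance
def pvWitness_find_previous : List Int × List Int × Int := ([4, 2, 7], [1, 3, 1], 1)

def Spec_find_previous (pre_list : List Int) (this_list : List Int) (x : Int) (out : Int) : Prop := out = find_previous_alt pre_list this_list x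
instance (pre_list : List Int) (this_list : List Int) (x : Int) (out : Int) : Decidable (Spec_find_previous pre_list this_list x out) := by unfold Spec_find_previous; infer_instance

-- ===== CLAIM (what is proved, stated in full; the proofs are below) =====
def Claim_equal_find_previous : Prop := ∀ (pre_list : List Int) (this_list : List Int) (x : Int), Dom_find_previous pre_list this_list x → Pre_find_previous pre_list this_list x → Spec_find_previous pre_list this_list x (find_previous pre_list this_list x)

-- ===== LEMMAS AND PROOFS =====

-- A's 0/1/many case analysis over the candidates list is min? (or -1 if empty)
theorem pvCaseA (C : List Int) :
    (if C.length = 0 then (-1 : Int)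
     else if C.length = 1 then PySem.List.pyGetD C 0 0
     else (PySem.List.min? C id).getD 0)
    = (match PySem.List.min? C id with
       | none => -1
       | some m => m) := by
  match C with
  | [] => rfl
  | [c] => simp [PySem.List.min?, PySem.List.pyGetD, PySem.List.pyIdx?, PySem.List.pyGet?]
  | c1 :: c2 :: cs =>
    rw [if_neg (by simp only [List.length_cons]; omega),
      if_neg (by simp only [List.length_cons]; omega)]
    obtain ⟨m, hm⟩ := Option.isSome_iff_exists.mp
      (by rw [Option.isSome_iff_ne_none]
          intro h
          exact absurd ((PySem.List.min?_eq_none_iff _ _).mp h) (by simp) :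
        (PySem.List.min? (c1 :: c2 :: cs) id).isSome)
    simp [hm]

-- B's early-return scan is head-of-filter
theorem pvScan_eq_head (x : Int) (l : List (Int × Int)) :
    pvScan x l = (match (l.filter (fun pt => pt.2 = x)).head? with
                  | none => -1
                  | some pt => pt.1) := by
  induction l with
  | nil => rfl
  | cons pt rest ih =>
    by_cases h : pt.2 = x
    · simp [pvScan, h]
    · simpa [pvScan, List.filter_cons, h] using ih

-- under Pre_, A's candidates list equals the firsts of the matching zip pairs
theorem pvKey (pre this : List Int) (x : Int)
    (h : ∀ j ∈ List.range this.length, this.getD j 0 = x → j < pre.length) :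
    ((List.range this.length).filter (fun j => this.getD j 0 = x)).map
        (fun j => pre.getD j 0)
    = ((pre.zip this).filter (fun pt => pt.2 = x)).map Prod.fst := by
  induction this generalizing pre with
  | nil => simp
  | cons t ts ih =>
    cases pre with
    | nil =>
      have hnil : (List.range (t :: ts).length).filter (fun j => (t :: ts).getD j 0 = x) = [] := by
        rw [List.filter_eq_nil_iff]
        intro j hj
        simp only [decide_eq_true_eq]
        intro hx
        exact absurd (h j hj hx) (Nat.not_lt_zero j)
      rw [hnil]
      simp
    | cons p ps =>
      have hts : ∀ j ∈ List.range ts.length, ts.getD j 0 = x → j < ps.length := by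
        intro j hj hx
        have h2 := h (j + 1) (by simpa using Nat.succ_lt_succ (List.mem_range.mp hj))
          (by simpa using hx)
        simp only [List.length_cons] at h2
        omega
      have := ih ps hts
      simp only [List.length_cons, List.range_succ_eq_map, List.filter_cons,
        List.getD_cons_zero, List.filter_map, List.zip_cons_cons]
      by_cases hx : t = x
      · simp only [hx, decide_true, if_true, List.map_cons, List.getD_cons_zero]
        congr 1
        simpa [Function.comp_def, Nat.succ_eq_add_one, List.getD_cons_succ,
          List.map_map] using this
      · simp only [hx, decide_false]
        simpa [Function.comp_def, Nat.succ_eq_add_one, List.getD_cons_succ,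
          List.map_map] using this

-- core: min over the matching pre-values = pre-value of the first match in sorted order
theorem pvMinEqSortedHead (L : List (Int × Int)) (x : Int) :
    (match PySem.List.min? ((L.filter (fun pt => pt.2 = x)).map Prod.fst) id with
     | none => -1
     | some m => m)
    = (match ((PySem.List.sorted L (fun pt => pt.1) false).filter
              (fun pt => pt.2 = x)).head? with
       | none => -1
       | some pt => pt.1) := by
  set S := PySem.List.sorted L (fun pt => pt.1) false with hS
  have hperm : (S.filter (fun pt => pt.2 = x)).Perm (L.filter (fun pt => pt.2 = x)) :=
    (PySem.List.sorted_perm L (fun pt => pt.1) false).filter _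
  match hF : S.filter (fun pt => decide (pt.2 = x)) with
  | [] =>
    have hL : L.filter (fun pt => decide (pt.2 = x)) = [] := ((hF ▸ hperm).symm).eq_nil
    simp [hF, hL, PySem.List.min?]
  | h :: t =>
    -- head of the filtered sorted list is a matching pair with minimal first component
    have hmemS : h ∈ S.filter (fun pt => decide (pt.2 = x)) := by rw [hF]; exact List.mem_cons_self
    have hmemL : h ∈ L.filter (fun pt => decide (pt.2 = x)) := hperm.mem_iff.mp (hF ▸ hmemS)
    have hC : h.1 ∈ (L.filter (fun pt => pt.2 = x)).map Prod.fst := List.mem_map_of_mem hmemL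
    obtain ⟨m, hm⟩ := Option.isSome_iff_exists.mp
      (by rw [Option.isSome_iff_ne_none]
          intro hn
          rw [PySem.List.min?_eq_none_iff _ _] at hn
          simp [hn] at hC :
        (PySem.List.min? ((L.filter (fun pt => pt.2 = x)).map Prod.fst) id).isSome)
    -- m ≤ h.1 : min? is a lower bound
    have h1 : m ≤ h.1 := PySem.List.min?_isMin hm h.1 hC
    -- h.1 ≤ m : m is the first of some matching pair, which occurs in the sorted filter
    obtain ⟨q, hqL, hqm⟩ := List.mem_map.mp (PySem.List.min?_mem hm)
    have hqS : q ∈ S.filter (fun pt => decide (pt.2 = x)) := hperm.mem_iff.mpr hqL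
    have hpw : (S.filter (fun pt => decide (pt.2 = x))).Pairwise (fun a b => a.1 ≤ b.1) :=
      (PySem.List.sorted_pairwise L (fun pt => pt.1)).sublist List.filter_sublist
    have h2 : h.1 ≤ m := by
      rw [hF] at hqS hpw
      rcases List.mem_cons.mp hqS with rfl | hqt
      · exact hqm.le
      · exact hqm ▸ (List.pairwise_cons.mp hpw).1 q hqt
    simp [hm, hF, le_antisymm h1 h2]

-- ===== VERDICT (by name: the statement is the Claim_ definition above) =====
theorem find_previous_spec : Claim_equal_find_previous := by
  intro pre this x _ hPre
  unfold Spec_find_previous find_previous find_previous_alt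
  rw [show ((fun acc j => if x = PySem.List.pyGetD this j 0
        then acc ++ [PySem.List.pyGetD pre j 0] else acc) : List Int → Int → List Int)
      = (fun acc j => if (fun j => decide (x = PySem.List.pyGetD this j 0)) j = true
        then acc ++ [(fun j => PySem.List.pyGetD pre j 0) j] else acc) by
    funext acc j; simp]
  rw [PySem.List.foldl_append_if, PySem.List.pyRange_zero_natCast, List.filter_map,
    List.map_map, List.nil_append, pvScan_eq_head]
  have hcand :
      List.map ((fun j => PySem.List.pyGetD pre j 0) ∘ fun k : Nat => (k : Int))
        (List.filter ((fun j => decide (x = PySem.List.pyGetD this j 0)) ∘ fun k : Nat => (k : Int))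
          (List.range this.length))
      = List.map Prod.fst (List.filter (fun pt => decide (pt.2 = x)) (pre.zip this)) := by
    rw [← pvKey pre this x hPre]
    simp only [Function.comp_def, PySem.List.pyGetD_natCast]
    congr 1
    apply List.filter_congr
    intro j _
    simp [eq_comm]
  rw [hcand]
  exact pvCaseA _ ▸ pvMinEqSortedHead (pre.zip this) x
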